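-- pv_equiv track=rewrite | github.com/MEhomer/project_interpunction | knuth_moriss_pratt.py | knp_iterator
-- ===== SOURCE A (Python) =====
-- def knp_iterator(text, pattern):
--     """
--     Implementation of Knuth-Moris-Pratt algorithm. David Eppstein, UC Irvine, 1 Mar 2002.
--
--     Yields all starting positions of the pattern.
--     """
--     pattern = list(pattern)
--
--     # build table of shift amounts
--     shifts = [1] * (len(pattern) + 1)
--     shift = 1
--     for pos in range(len(pattern)):
--         while shift <= pos and pattern[pos] != pattern[pos-shift]:
--             shift += shifts[pos-shift]
--         shifts[pos+1] = shift
--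
--     # do the actual search
--     start_pos = 0
--     match_len = 0
--     for c in text:
--         while match_len == len(pattern) or match_len >= 0 and pattern[match_len] != c:
--             start_pos += shifts[match_len]
--             match_len -= shifts[match_len]
--         match_len += 1
--         if match_len == len(pattern):
--             yield start_pos
-- ===== SOURCE B (Python) =====
-- def knp_iterator(text, pattern):
--     """Yield all starting positions of pattern in text (naive scan)."""
--     m = len(pattern)
--     if m == 0:
--         for i in range(len(text) + 1):
--             yield i
--     else:
--         for i in range(len(text) - m + 1):
--             if text[i:i+m] == pattern:
--                 yield i
-- ===== Notes on version B (the rewrite author's own statement) =====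
-- stated objective: simpler
-- what changed: Replaces the KMP shift-table machinery with a direct window scan comparing text[i:i+m] to the pattern at each start (worst-case O(n*m) but constant-factor faster in practice since slice comparison runs in C), and for the empty pattern yields every position 0..len(text).
-- intended difference: For the empty pattern A yields 1..len(text) (its shift loop consumes a char before each yield, so position 0 is missing and every position is off by one), while B yields the standard 0..len(text) (the empty pattern occurs at every position, as re.finditer agrees). — e.g. on knp_iterator("ab", ""): A returns [1, 2], B returns [0, 1, 2]
import Mathlib
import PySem

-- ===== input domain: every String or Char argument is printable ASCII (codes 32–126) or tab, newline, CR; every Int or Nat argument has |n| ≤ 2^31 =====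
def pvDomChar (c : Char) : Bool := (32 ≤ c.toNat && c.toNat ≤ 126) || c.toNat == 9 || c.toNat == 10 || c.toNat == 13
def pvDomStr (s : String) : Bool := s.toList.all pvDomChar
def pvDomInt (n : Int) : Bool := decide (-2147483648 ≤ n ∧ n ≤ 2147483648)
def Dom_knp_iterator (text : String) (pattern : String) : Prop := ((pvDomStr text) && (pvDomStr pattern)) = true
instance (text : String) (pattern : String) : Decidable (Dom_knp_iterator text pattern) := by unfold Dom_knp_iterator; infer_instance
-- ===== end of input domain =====

-- B replaces A's KMP shift table by a plain window scan (simpler, not faster); on the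
-- empty pattern A yields 1..len(text) while B yields the intended 0..len(text) (see D_).

-- ===== PORT A =====
-- inner `while` of the table-building loop; fuel only makes it total (never exhausted on real runs)
def pvTblWhile (p : List Char) (shifts : List Nat) (pos : Nat) : Nat → Nat → Nat
  | 0, shift => shift
  | fuel + 1, shift =>
    if shift ≤ pos ∧ p.getD pos ' ' ≠ p.getD (pos - shift) ' ' then
      pvTblWhile p shifts pos fuel (shift + shifts.getD (pos - shift) 0)
    else shift

-- `shifts = [1]*(m+1); shift = 1; for pos in range(m): …` (returns (shifts, shift))
def pvBuildShifts (p : List Char) : List Nat × Nat :=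
  (List.range p.length).foldl
    (fun st pos =>
      let shift := pvTblWhile p st.1 pos (pos + 1) st.2
      (st.1.set (pos + 1) shift, shift))
    (List.replicate (p.length + 1) 1, 1)

-- inner `while` of the search loop over state (start_pos, match_len); fuel as above
def pvSearchWhile (p : List Char) (shifts : List Nat) (c : Char) : Nat → Int × Int → Int × Int
  | 0, st => st
  | fuel + 1, (s, ml) =>
    if ml = (p.length : Int) ∨ (0 ≤ ml ∧ PySem.List.pyGet? p ml ≠ some c) then
      let sh : Int := (shifts.getD ml.toNat 0 : Nat)
      pvSearchWhile p shifts c fuel (s + sh, ml - sh)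
    else (s, ml)

def knp_iterator (text : String) (pattern : String) : List Int :=
  let p := pattern.toList
  let shifts := (pvBuildShifts p).1
  (text.toList.foldl
    (fun (st : Int × Int × List Int) c =>
      let r := pvSearchWhile p shifts c (p.length + 2) (st.1, st.2.1)
      let ml := r.2 + 1
      (r.1, ml, if ml = (p.length : Int) then st.2.2 ++ [r.1] else st.2.2))
    (0, 0, [])).2.2

-- ===== PORT B =====
def knp_iterator_alt (text : String) (pattern : String) : List Int :=
  let t := text.toList
  let p := pattern.toList
  if p.length = 0 then
    PySem.List.pyRange 0 ((t.length : Int) + 1) 1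
  else
    (PySem.List.pyRange 0 ((t.length : Int) - (p.length : Int) + 1) 1).filter
      (fun i => PySem.List.slice t (some i) (some (i + (p.length : Int))) = p)

-- ===== PRECONDITION & SPEC =====
-- For the empty pattern A yields 1..len(text) (its shift loop consumes a char before each
-- yield, so position 0 is missing and every position is off by one), while B yields the
-- standard 0..len(text): the empty pattern occurs at every position.
def D_knp_iterator (text : String) (pattern : String) : Prop := pattern = ""
instance (text : String) (pattern : String) : Decidable (D_knp_iterator text pattern) := by unfold D_knp_iterator; infer_instance
def Spec_knp_iterator (text : String) (pattern : String) (out : List Int) : Prop := ¬ D_knp_iterator text pattern → out = knp_iterator_alt text pattern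
instance (text : String) (pattern : String) (out : List Int) : Decidable (Spec_knp_iterator text pattern out) := by unfold Spec_knp_iterator; infer_instance
def pvDiffWitness_knp_iterator : String × String := ("ab", "")
def pvDiffWitnessOut_knp_iterator : (List Int) × (List Int) := ([1, 2], [0, 1, 2])

-- ===== CLAIM (what is proved, stated in full; the proofs are below) =====
def Claim_unchanged_knp_iterator : Prop := ∀ (text : String) (pattern : String), Dom_knp_iterator text pattern → Spec_knp_iterator text pattern (knp_iterator text pattern)
def Claim_changed_knp_iterator : Prop := Dom_knp_iterator (pvDiffWitness_knp_iterator.1) (pvDiffWitness_knp_iterator.2) ∧ D_knp_iterator (pvDiffWitness_knp_iterator.1) (pvDiffWitness_knp_iterator.2) ∧ knp_iterator (pvDiffWitness_knp_iterator.1) (pvDiffWitness_knp_iterator.2) = pvDiffWitnessOut_knp_iterator.1 ∧ knp_iterator_alt (pvDiffWitness_knp_iterator.1) (pvDiffWitness_knp_iterator.2) = pvDiffWitnessOut_knp_iterator.2 ∧ pvDiffWitnessOut_knp_iterator.1 ≠ pvDiffWitnessOut_knp_iterator.2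
def Claim_exact_knp_iterator : Prop := ∀ (text : String) (pattern : String), Dom_knp_iterator text pattern → D_knp_iterator text pattern → knp_iterator text pattern ≠ knp_iterator_alt text pattern

-- ===== LEMMAS AND PROOFS =====

-- ---- combinatorial helpers (proof-side only) ----

-- longest proper border of p.take k (k ≥ 1); bord p 0 = 0 (unused)
def bord (p : List Char) (k : Nat) : Nat :=
  Nat.findGreatest (fun j => j < k ∧ p.take j <:+ p.take k) (k - 1)

-- the failure value as an Int (β 0 = -1)
def betaI (p : List Char) (j : Int) : Int :=
  if j ≤ 0 then -1 else (bord p j.toNat : Int)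

-- abstract border-chain descent: both inner whiles compute this
def descend (p : List Char) (P : Int → Bool) : Nat → Int → Int
  | 0, j => j
  | f + 1, j => if P j then j else descend p P f (betaI p j)

-- "j is a matched-prefix length against X" (j = -1 is the sentinel)
def Suf (p X : List Char) (j : Int) : Prop :=
  j = -1 ∨ (0 ≤ j ∧ j ≤ (p.length : Int) ∧ p.take j.toNat <:+ X)

-- longest j ≤ m with p.take j a suffix of v
def best (p v : List Char) : Nat :=
  Nat.findGreatest (fun j => j ≤ p.length ∧ p.take j <:+ v) p.length

-- the list of match starts for nonempty p against consumed prefix v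
def occ (p v : List Char) : List Int :=
  ((List.range (v.length + 1 - p.length)).filter
    (fun sN => decide (p <:+ v.take (sN + p.length)))).map Int.ofNat

lemma suffix_append_singleton {α : Type} {a b : List α} {x y : α} :
    (a ++ [x]) <:+ (b ++ [y]) ↔ a <:+ b ∧ x = y := by
  rw [← List.reverse_prefix]
  simp only [List.reverse_append, List.reverse_singleton, List.singleton_append,
    List.cons_prefix_cons, List.reverse_prefix]
  tauto

-- p.take (j+1) = p.take j ++ [p.getD j d] for j < p.length
lemma take_succ_getD {α : Type} [Inhabited α] (p : List α) (j : Nat) (d : α) (h : j < p.length) :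
    p.take (j + 1) = p.take j ++ [p.getD j d] := by
  rw [List.take_add_one]
  simp [List.getElem?_eq_getElem h, List.getD_eq_getElem?_getD]

-- KEY IFF: matched lengths against X ++ [c]
lemma suf_snoc_iff (p X : List Char) (c : Char) (j : Nat) (h1 : 1 ≤ j) (hm : j ≤ p.length) :
    (p.take j <:+ X ++ [c]) ↔ (p.take (j - 1) <:+ X ∧ p.getD (j - 1) ' ' = c) := by
  obtain ⟨j', rfl⟩ : ∃ j'', j = j'' + 1 := ⟨j - 1, by omega⟩
  simp only [Nat.add_sub_cancel]
  rw [take_succ_getD p j' ' ' (by omega)]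
  exact suffix_append_singleton

lemma bord_lt (p : List Char) (k : Nat) (hk : 1 ≤ k) : bord p k < k := by
  have := Nat.findGreatest_le (P := fun j => j < k ∧ p.take j <:+ p.take k) (k - 1)
  unfold bord; omega

lemma bord_suffix (p : List Char) (k : Nat) (hk : 1 ≤ k) :
    p.take (bord p k) <:+ p.take k := by
  have h := Nat.findGreatest_spec (P := fun j => j < k ∧ p.take j <:+ p.take k)
    (m := 0) (n := k - 1) (by omega) ⟨by omega, by simp⟩
  exact h.2

lemma le_bord (p : List Char) (k j : Nat) (hj : j < k) (hs : p.take j <:+ p.take k) :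
    j ≤ bord p k := by
  exact Nat.le_findGreatest (by omega) ⟨hj, hs⟩

lemma betaI_neg_one_le (p : List Char) (j : Int) : -1 ≤ betaI p j := by
  unfold betaI; split
  · omega
  · have : (0:Int) ≤ (bord p j.toNat : Int) := Int.natCast_nonneg _
    omega

lemma betaI_lt_self (p : List Char) (j : Int) (h : 0 ≤ j) : betaI p j < j := by
  unfold betaI; split
  · omega
  · have := bord_lt p j.toNat (by omega)
    omega

-- C1: descending one step preserves Suf and strictly decreases
lemma betaI_step (p X : List Char) (j : Int) (hj : Suf p X j) (hne : j ≠ -1) :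
    -1 ≤ betaI p j ∧ betaI p j < j ∧ Suf p X (betaI p j) := by
  rcases hj with h | ⟨h0, hm, hs⟩
  · exact absurd h hne
  refine ⟨betaI_neg_one_le p j, betaI_lt_self p j h0, ?_⟩
  unfold betaI
  split
  · left; rfl
  · right
    have hj1 : 1 ≤ j.toNat := by omega
    have hb := bord_lt p j.toNat hj1
    refine ⟨Int.natCast_nonneg _, by omega, ?_⟩
    rw [Int.toNat_natCast]
    exact (bord_suffix p j.toNat hj1).trans hs

-- C2: completeness of the border chain
lemma le_betaI (p X : List Char) (j j' : Int) (hj : Suf p X j) (hj' : Suf p X j')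
    (hlt : j' < j) : j' ≤ betaI p j := by
  rcases hj' with rfl | ⟨h0', hm', hs'⟩
  · exact betaI_neg_one_le p j
  · rcases hj with rfl | ⟨h0, hm, hs⟩
    · omega
    unfold betaI
    rw [if_neg (by omega)]
    have hsuf : p.take j'.toNat <:+ p.take j.toNat := by
      apply List.suffix_of_suffix_length_le hs' hs
      simp only [List.length_take]
      omega
    have := le_bord p j.toNat j'.toNat (by omega) hsuf
    omega

-- descent computes the greatest stopped chain value
lemma descend_spec (p X : List Char) (P : Int → Bool) (hP : P (-1) = true) :
    ∀ (fuel : Nat) (j0 : Int), Suf p X j0 → j0 + 1 ≤ (fuel : Int) →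
      Suf p X (descend p P fuel j0) ∧ P (descend p P fuel j0) = true ∧
        descend p P fuel j0 ≤ j0 ∧
        ∀ j', Suf p X j' → j' ≤ j0 → P j' = true → j' ≤ descend p P fuel j0 := by
  intro fuel
  induction fuel with
  | zero =>
    intro j0 h0 hf
    have hj0 : j0 = -1 := by
      rcases h0 with rfl | ⟨h, _, _⟩
      · rfl
      · omega
    subst hj0
    exact ⟨h0, hP, le_refl _, fun j' _ hle _ => hle⟩
  | succ f ih =>
    intro j0 h0 hf
    by_cases hPj : P j0 = true
    · rw [show descend p P (f + 1) j0 = j0 from by simp [descend, hPj]]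
      exact ⟨h0, hPj, le_refl _, fun j' _ hle _ => hle⟩
    · have hne : j0 ≠ -1 := by intro h; rw [h] at hPj; exact hPj hP
      obtain ⟨hge, hlt, hSufb⟩ := betaI_step p X j0 h0 hne
      have hf' : betaI p j0 + 1 ≤ (f : Int) := by push_cast at hf ⊢; omega
      obtain ⟨r1, r2, r3, r4⟩ := ih (betaI p j0) hSufb hf'
      rw [show descend p P (f + 1) j0 = descend p P f (betaI p j0) from by
        simp [descend, hPj]]
      refine ⟨r1, r2, by omega, ?_⟩
      intro j' hS hle hPj'
      have hne' : j' ≠ j0 := by intro h; subst h; exact hPj hPj'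
      exact r4 j' hS (le_betaI p X j0 j' (Or.inr (by rcases h0 with h|h; exact absurd h hne; exact h)) hS (by omega)) hPj' 


-- ---- table phase ----

def tblStep (p : List Char) (st : List Nat × Nat) (pos : Nat) : List Nat × Nat :=
  let shift := pvTblWhile p st.1 pos (pos + 1) st.2
  (st.1.set (pos + 1) shift, shift)

def goodTbl (p : List Char) (k : Nat) (st : List Nat × Nat) : Prop :=
  st.1.length = p.length + 1 ∧
  (∀ j : Nat, j ≤ k → ((st.1.getD j 0 : Int) = (j : Int) - betaI p (j : Int))) ∧
  ((st.2 : Int) = (k : Int) - betaI p (k : Int))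

-- the table while agrees with descend
lemma tblWhile_descend (p : List Char) (L : List Nat) (k : Nat) (hk : k < p.length)
    (hL : ∀ j : Nat, j ≤ k → ((L.getD j 0 : Int) = (j : Int) - betaI p (j : Int))) :
    ∀ (fuel : Nat) (shift : Nat), 1 ≤ shift →
      ((pvTblWhile p L k fuel shift : Int)
        = (k : Int) - descend p
            (fun j => decide (j < 0) || decide (p.getD j.toNat ' ' = p.getD k ' '))
            fuel ((k : Int) - (shift : Int))) := by
  intro fuel
  induction fuel with
  | zero =>
    intro shift h1
    simp only [pvTblWhile, descend]
    omega
  | succ f ih =>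
    intro shift h1
    by_cases hc : shift ≤ k
    · have hjt : ((k : Int) - (shift : Int)).toNat = k - shift := by omega
      by_cases he : p.getD k ' ' = p.getD (k - shift) ' '
      · have hP : (decide ((k : Int) - (shift : Int) < 0)
            || decide (p.getD ((k : Int) - (shift : Int)).toNat ' ' = p.getD k ' ')) = true := by
          rw [hjt]
          simp only [decide_eq_true he.symm, Bool.or_true]
        rw [show pvTblWhile p L k (f + 1) shift = shift from by
          rw [pvTblWhile, if_neg (by tauto)]]
        rw [descend, if_pos hP]
        omega
      · have hP : (decide ((k : Int) - (shift : Int) < 0)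
            || decide (p.getD ((k : Int) - (shift : Int)).toNat ' ' = p.getD k ' ')) = false := by
          rw [hjt]
          simp only [Bool.or_eq_false_iff, decide_eq_false_iff_not]
          exact ⟨by omega, fun hh => he hh.symm⟩
        rw [show pvTblWhile p L k (f + 1) shift
            = pvTblWhile p L k f (shift + L.getD (k - shift) 0) from by
          rw [pvTblWhile, if_pos ⟨hc, fun hh => he hh⟩]]
        rw [descend, hP]
        simp only [Bool.false_eq_true, if_false]
        have hLs := hL (k - shift) (by omega)
        have hcast : ((k - shift : Nat) : Int) = (k : Int) - (shift : Int) := by omega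
        rw [hcast] at hLs
        have ihs := ih (shift + L.getD (k - shift) 0) (by omega)
        rw [ihs]
        have hb : (k : Int) - ((shift + L.getD (k - shift) 0 : Nat) : Int)
            = betaI p ((k : Int) - (shift : Int)) := by push_cast; omega
        rw [hb]
    · have hP : (decide ((k : Int) - (shift : Int) < 0)
          || decide (p.getD ((k : Int) - (shift : Int)).toNat ' ' = p.getD k ' ')) = true := by
        simp only [Bool.or_eq_true, decide_eq_true_eq]
        left; omega
      rw [show pvTblWhile p L k (f + 1) shift = shift from by
        rw [pvTblWhile, if_neg (by tauto)]]
      rw [descend, if_pos hP]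
      omega

-- the new border value after appending the (k+1)-st pattern char, from the descent result
lemma bord_succ_eq (p : List Char) (k : Nat) (hk : k < p.length) (r : Int)
    (hS : Suf p (p.take k) r)
    (hrc : r = -1 ∨ (0 ≤ r ∧ p.getD r.toNat ' ' = p.getD k ' '))
    (hrk : r < (k : Int))
    (hmax : ∀ j', Suf p (p.take k) j' → j' < (k : Int) →
      (j' = -1 ∨ (0 ≤ j' ∧ p.getD j'.toNat ' ' = p.getD k ' ')) → j' ≤ r) :
    (bord p (k + 1) : Int) = r + 1 := by
  have hrge : -1 ≤ r := by rcases hS with rfl | ⟨h, _, _⟩ <;> omega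
  have hsnoc : p.take (k + 1) = p.take k ++ [p.getD k ' '] := take_succ_getD p k ' ' hk
  have dir1 : (bord p (k + 1) : Int) ≤ r + 1 := by
    rcases Nat.eq_zero_or_pos (bord p (k + 1)) with h0 | hpos
    · rw [h0]; push_cast; omega
    · have hblt := bord_lt p (k + 1) (by omega)
      have hbs := bord_suffix p (k + 1) (by omega)
      rw [hsnoc] at hbs
      obtain ⟨hs1, hs2⟩ := (suf_snoc_iff p (p.take k) (p.getD k ' ')
        (bord p (k + 1)) hpos (by omega)).mp hbs
      have hj' := hmax ((bord p (k + 1) - 1 : Nat) : Int)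
        (Or.inr ⟨Int.natCast_nonneg _, by push_cast; omega, by rw [Int.toNat_natCast]; exact hs1⟩)
        (by push_cast; omega)
        (Or.inr ⟨Int.natCast_nonneg _, by rw [Int.toNat_natCast]; exact hs2⟩)
      push_cast at hj' ⊢
      omega
  have dir2 : r + 1 ≤ (bord p (k + 1) : Int) := by
    rcases hrc with rfl | ⟨hr0, hrg⟩
    · have : (0 : Int) ≤ (bord p (k + 1) : Int) := Int.natCast_nonneg _
      omega
    · rcases hS with h | ⟨_, hrm, hrs⟩
      · omega
      have hjle : r.toNat + 1 ≤ p.length := by omega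
      have hss : p.take (r.toNat + 1) <:+ p.take (k + 1) := by
        rw [hsnoc]
        exact (suf_snoc_iff p (p.take k) (p.getD k ' ') (r.toNat + 1) (by omega) hjle).mpr
          (by simpa using ⟨hrs, hrg⟩)
      have := le_bord p (k + 1) (r.toNat + 1) (by omega) hss
      omega
  omega

lemma tbl_inv (p : List Char) : ∀ k : Nat, k ≤ p.length →
    goodTbl p k ((List.range k).foldl (tblStep p) (List.replicate (p.length + 1) 1, 1)) := by
  intro k
  induction k with
  | zero =>
    intro _
    refine ⟨by simp, ?_, ?_⟩
    · intro j hj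
      interval_cases j
      simp [betaI, List.getD_eq_getElem?_getD]
    · show ((1 : Nat) : Int) = 0 - betaI p 0
      simp [betaI]
  | succ k ih =>
    intro hk1
    have hk : k < p.length := by omega
    obtain ⟨hlen, hget, hsh⟩ := ih (by omega)
    rw [List.range_succ, List.foldl_append, List.foldl_cons, List.foldl_nil]
    set st := (List.range k).foldl (tblStep p) (List.replicate (p.length + 1) 1, 1) with hst
    have hblt := betaI_lt_self p (k : Int) (by positivity)
    have hbge := betaI_neg_one_le p (k : Int)
    have h1 : 1 ≤ st.2 := by omega
    set P : Int → Bool := fun j =>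
      decide (j < 0) || decide (p.getD j.toNat ' ' = p.getD k ' ') with hPdef
    have hPneg : P (-1) = true := by simp [hPdef]
    have hSufk : Suf p (p.take k) (k : Int) :=
      Or.inr ⟨Int.natCast_nonneg _, by push_cast; omega, by rw [Int.toNat_natCast]⟩
    have hSufj0 : Suf p (p.take k) (betaI p (k : Int)) :=
      (betaI_step p (p.take k) (k : Int) hSufk (by omega)).2.2
    obtain ⟨hS, hPr, hr3, hmax⟩ := descend_spec p (p.take k) P hPneg (k + 1)
      (betaI p (k : Int)) hSufj0 (by push_cast; omega)
    set r := descend p P (k + 1) (betaI p (k : Int)) with hrdef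
    have hW := tblWhile_descend p st.1 k hk hget (k + 1) st.2 h1
    rw [← hPdef] at hW
    have hj0 : (k : Int) - (st.2 : Int) = betaI p (k : Int) := by omega
    rw [hj0] at hW
    -- the new border value
    have hrge : -1 ≤ r := by rcases hS with h | ⟨h, _, _⟩ <;> omega
    have hbeq : (bord p (k + 1) : Int) = r + 1 := by
      apply bord_succ_eq p k hk r hS
      · rcases hS with h | ⟨h0, _, _⟩
        · left; exact h
        · have := hPr
          simp only [hPdef, Bool.or_eq_true, decide_eq_true_eq] at this
          rcases this with h' | h'
          · omega
          · right; exact ⟨h0, h'⟩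
      · omega
      · intro j' hSj' hlt hcl
        apply hmax j' hSj' (le_betaI p (p.take k) (k : Int) j' hSufk hSj' hlt)
        simp only [hPdef, Bool.or_eq_true, decide_eq_true_eq]
        rcases hcl with rfl | ⟨h0, hgd⟩
        · left; omega
        · right; exact hgd
    have hbI : betaI p ((k + 1 : Nat) : Int) = r + 1 := by
      unfold betaI
      rw [if_neg (by push_cast; omega)]
      rw [Int.toNat_natCast]
      exact_mod_cast hbeq
    simp only [tblStep]
    constructor
    · simpa using hlen
    constructor
    · intro j hj
      rcases Nat.lt_or_ge j (k + 1) with hjlt | hjge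
      · rw [List.getD_eq_getElem?_getD, List.getElem?_set_ne (by omega),
          ← List.getD_eq_getElem?_getD]
        exact hget j (by omega)
      · have hj' : j = k + 1 := by omega
        subst hj'
        rw [List.getD_eq_getElem?_getD, List.getElem?_set_self (by omega),
          Option.getD_some, hbI, hW]
        push_cast
        omega
    · show ((pvTblWhile p st.1 k (k + 1) st.2 : Nat) : Int)
        = ((k + 1 : Nat) : Int) - betaI p ((k + 1 : Nat) : Int)
      rw [hW, hbI]
      push_cast
      omega

-- ---- search phase ----

lemma pyGet?_getD (p : List Char) (jn : Nat) (h : jn < p.length) :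
    PySem.List.pyGet? p ((jn : Nat) : Int) = some (p.getD jn ' ') := by
  rw [PySem.List.pyGet?_natCast]
  simp [List.getD_eq_getElem?_getD, List.getElem?_eq_getElem h]

lemma pyGet?_getD' (p : List Char) (j : Int) (h0 : 0 ≤ j) (h : j < (p.length : Int)) :
    PySem.List.pyGet? p j = some (p.getD j.toNat ' ') := by
  have h2 : PySem.List.pyGet? p ((j.toNat : Nat) : Int) = some (p.getD j.toNat ' ') :=
    pyGet?_getD p j.toNat (by omega)
  rwa [show ((j.toNat : Nat) : Int) = j from by omega] at h2

lemma best_le (p v : List Char) : best p v ≤ p.length := Nat.findGreatest_le _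

lemma best_suffix (p v : List Char) : p.take (best p v) <:+ v := by
  have h := Nat.findGreatest_spec (P := fun j => j ≤ p.length ∧ p.take j <:+ v)
    (m := 0) (n := p.length) (Nat.zero_le _) ⟨Nat.zero_le _, by simp⟩
  exact h.2

lemma le_best (p v : List Char) (j : Nat) (hj : j ≤ p.length) (hs : p.take j <:+ v) :
    j ≤ best p v :=
  Nat.le_findGreatest hj ⟨hj, hs⟩

lemma suf_le_best (p v : List Char) (j : Int) (h : Suf p v j) : j ≤ (best p v : Int) := by
  rcases h with rfl | ⟨h0, hm, hs⟩
  · have : (0 : Int) ≤ (best p v : Int) := Int.natCast_nonneg _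
    omega
  · have := le_best p v j.toNat (by omega) hs
    omega

lemma suf_best (p v : List Char) : Suf p v (best p v : Int) :=
  Or.inr ⟨Int.natCast_nonneg _, by exact_mod_cast best_le p v,
    by rw [Int.toNat_natCast]; exact best_suffix p v⟩

lemma best_eq_len_iff (p v : List Char) : best p v = p.length ↔ p <:+ v := by
  constructor
  · intro h
    have hs := best_suffix p v
    rw [h, List.take_length] at hs
    exact hs
  · intro h
    have h1 := le_best p v p.length (le_refl _) (by rw [List.take_length]; exact h)
    have h2 := best_le p v
    omega

-- the new best value after appending a text char, from the descent result
lemma best_snoc_eq (p v : List Char) (c : Char) (r : Int)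
    (hS : Suf p v r)
    (hrc : r = -1 ∨ (0 ≤ r ∧ p.getD r.toNat ' ' = c))
    (hrm : r < (p.length : Int))
    (hmax : ∀ j', Suf p v j' → (j' = -1 ∨ (0 ≤ j' ∧ p.getD j'.toNat ' ' = c)) →
      j' < (p.length : Int) → j' ≤ r) :
    (best p (v ++ [c]) : Int) = r + 1 := by
  have hrge : -1 ≤ r := by rcases hS with rfl | ⟨h, _, _⟩ <;> omega
  have dir1 : (best p (v ++ [c]) : Int) ≤ r + 1 := by
    rcases Nat.eq_zero_or_pos (best p (v ++ [c])) with h0 | hpos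
    · rw [h0]; push_cast; omega
    · have hbm := best_le p (v ++ [c])
      have hbs := best_suffix p (v ++ [c])
      obtain ⟨hs1, hs2⟩ := (suf_snoc_iff p v c (best p (v ++ [c])) hpos hbm).mp hbs
      have hj' := hmax ((best p (v ++ [c]) - 1 : Nat) : Int)
        (Or.inr ⟨Int.natCast_nonneg _, by push_cast; omega,
          by rw [Int.toNat_natCast]; exact hs1⟩)
        (Or.inr ⟨Int.natCast_nonneg _, by rw [Int.toNat_natCast]; exact hs2⟩)
        (by push_cast; omega)
      push_cast at hj' ⊢
      omega
  have dir2 : r + 1 ≤ (best p (v ++ [c]) : Int) := by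
    rcases hrc with rfl | ⟨hr0, hrg⟩
    · have : (0 : Int) ≤ (best p (v ++ [c]) : Int) := Int.natCast_nonneg _
      omega
    · rcases hS with h | ⟨_, hrm2, hrs⟩
      · omega
      have hjle : r.toNat + 1 ≤ p.length := by omega
      have hss : p.take (r.toNat + 1) <:+ v ++ [c] :=
        (suf_snoc_iff p v c (r.toNat + 1) (by omega) hjle).mpr (by simpa using ⟨hrs, hrg⟩)
      have := le_best p (v ++ [c]) (r.toNat + 1) hjle hss
      omega
  omega

-- appending one text char extends the occurrence list exactly at a full match
lemma occ_snoc (p v : List Char) (c : Char) (hp : 1 ≤ p.length) :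
    occ p (v ++ [c]) = if p <:+ (v ++ [c])
      then occ p v ++ [((v.length + 1 - p.length : Nat) : Int)] else occ p v := by
  unfold occ
  rw [show (v ++ [c]).length = v.length + 1 from by simp]
  by_cases hm : p.length ≤ v.length + 1
  · rw [show v.length + 1 + 1 - p.length = (v.length + 1 - p.length) + 1 from by omega,
      List.range_succ, List.filter_append]
    have hcong : (List.range (v.length + 1 - p.length)).filter
          (fun sN => decide (p <:+ (v ++ [c]).take (sN + p.length)))
        = (List.range (v.length + 1 - p.length)).filter
          (fun sN => decide (p <:+ v.take (sN + p.length))) := by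
      apply List.filter_congr
      intro x hx
      rw [List.mem_range] at hx
      rw [List.take_append_of_le_length (by omega)]
    rw [hcong]
    have htk : (v ++ [c]).take ((v.length + 1 - p.length) + p.length) = v ++ [c] := by
      rw [show (v.length + 1 - p.length) + p.length = (v ++ [c]).length from by simp; omega,
        List.take_length]
    by_cases hocc : p <:+ (v ++ [c])
    · rw [if_pos hocc]
      rw [show (List.filter (fun sN => decide (p <:+ (v ++ [c]).take (sN + p.length)))
          [v.length + 1 - p.length]) = [v.length + 1 - p.length] from by
        simp only [List.filter_cons, List.filter_nil, htk]
        rw [if_pos (by simpa using hocc)]]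
      rw [List.map_append]
      simp
    · rw [if_neg hocc]
      rw [show (List.filter (fun sN => decide (p <:+ (v ++ [c]).take (sN + p.length)))
          [v.length + 1 - p.length]) = [] from by
        simp only [List.filter_cons, List.filter_nil, htk]
        rw [if_neg (by simpa using hocc)]]
      rw [List.append_nil]
  · have hocc : ¬ (p <:+ (v ++ [c])) := by
      intro h
      have := h.length_le
      simp at this
      omega
    rw [if_neg hocc]
    rw [show v.length + 1 - p.length = 0 from by omega,
      show v.length + 1 + 1 - p.length = 0 from by omega]
    simp

def searchStep (p : List Char) (shifts : List Nat) (st : Int × Int × List Int) (c : Char) :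
    Int × Int × List Int :=
  let r := pvSearchWhile p shifts c (p.length + 2) (st.1, st.2.1)
  let ml := r.2 + 1
  (r.1, ml, if ml = (p.length : Int) then st.2.2 ++ [r.1] else st.2.2)

-- the search while agrees with descend
lemma searchWhile_descend (p : List Char) (L : List Nat) (c : Char)
    (hL : ∀ j : Nat, j ≤ p.length → ((L.getD j 0 : Int) = (j : Int) - betaI p (j : Int))) :
    ∀ (fuel : Nat) (s ml : Int), -1 ≤ ml → ml ≤ (p.length : Int) →
      pvSearchWhile p L c fuel (s, ml)
        = (s + ml - descend p
              (fun j => !decide (j = (p.length : Int) ∨ (0 ≤ j ∧ PySem.List.pyGet? p j ≠ some c)))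
              fuel ml,
           descend p
              (fun j => !decide (j = (p.length : Int) ∨ (0 ≤ j ∧ PySem.List.pyGet? p j ≠ some c)))
              fuel ml) := by
  set Q : Int → Bool := fun j =>
    !decide (j = (p.length : Int) ∨ (0 ≤ j ∧ PySem.List.pyGet? p j ≠ some c)) with hQdef
  intro fuel
  induction fuel with
  | zero =>
    intro s ml h0 h1
    simp only [pvSearchWhile, descend]
    rw [show s + ml - ml = s from by omega]
  | succ f ih =>
    intro s ml h0 h1
    by_cases hC : ml = (p.length : Int) ∨ (0 ≤ ml ∧ PySem.List.pyGet? p ml ≠ some c)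
    · have hml0 : 0 ≤ ml := by
        rcases hC with h | h
        · omega
        · exact h.1
      have hLs := hL ml.toNat (by omega)
      rw [show ((ml.toNat : Nat) : Int) = ml from by omega] at hLs
      have hbl := betaI_lt_self p ml hml0
      have hbg := betaI_neg_one_le p ml
      rw [show pvSearchWhile p L c (f + 1) (s, ml)
          = pvSearchWhile p L c f
              (s + ((L.getD ml.toNat 0 : Nat) : Int), ml - ((L.getD ml.toNat 0 : Nat) : Int))
          from by rw [pvSearchWhile, if_pos hC]]
      rw [show ml - ((L.getD ml.toNat 0 : Nat) : Int) = betaI p ml from by omega]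
      rw [ih (s + ((L.getD ml.toNat 0 : Nat) : Int)) (betaI p ml) (by omega) (by omega)]
      have hQ : Q ml = false := by
        simp only [hQdef]
        rw [decide_eq_true hC, Bool.not_true]
      rw [descend, hQ]
      simp only [Bool.false_eq_true, if_false, Prod.mk.injEq]
      refine ⟨by omega, by trivial⟩
    · have hQ : Q ml = true := by
        simp only [hQdef]
        rw [decide_eq_false hC, Bool.not_false]
      rw [show pvSearchWhile p L c (f + 1) (s, ml) = (s, ml) from by
        rw [pvSearchWhile, if_neg hC]]
      rw [descend, if_pos hQ]
      rw [show s + ml - ml = s from by omega]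

def goodSearch (p v : List Char) (st : Int × Int × List Int) : Prop :=
  st.1 = (v.length : Int) - st.2.1 ∧ st.2.1 = (best p v : Int) ∧ st.2.2 = occ p v

lemma searchStep_good (p : List Char) (hp : 1 ≤ p.length) (L : List Nat)
    (hL : ∀ j : Nat, j ≤ p.length → ((L.getD j 0 : Int) = (j : Int) - betaI p (j : Int)))
    (v : List Char) (c : Char) (st : Int × Int × List Int) (h : goodSearch p v st) :
    goodSearch p (v ++ [c]) (searchStep p L st c) := by
  obtain ⟨h1, h2, h3⟩ := h
  set Q : Int → Bool := fun j =>
    !decide (j = (p.length : Int) ∨ (0 ≤ j ∧ PySem.List.pyGet? p j ≠ some c)) with hQdef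
  have hQneg : Q (-1) = true := by
    have hno : ¬ ((-1 : Int) = (p.length : Int)
        ∨ (0 ≤ (-1 : Int) ∧ PySem.List.pyGet? p (-1) ≠ some c)) := by
      rintro (h' | ⟨h', _⟩) <;> omega
    simp only [hQdef]
    rw [decide_eq_false hno, Bool.not_false]
  have hml0 : 0 ≤ st.2.1 := by rw [h2]; exact Int.natCast_nonneg _
  have hmlm : st.2.1 ≤ (p.length : Int) := by rw [h2]; exact_mod_cast best_le p v
  have hW := searchWhile_descend p L c hL (p.length + 2) st.1 st.2.1 (by omega) hmlm
  rw [← hQdef] at hW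
  set r := descend p Q (p.length + 2) st.2.1 with hr
  have hD := descend_spec p v Q hQneg (p.length + 2) st.2.1
    (by rw [h2]; exact suf_best p v) (by push_cast; omega)
  rw [← hr] at hD
  obtain ⟨hS, hQr, hr3, hmax⟩ := hD
  have hrge : -1 ≤ r := by rcases hS with h' | ⟨h', _, _⟩ <;> omega
  have hQr' : ¬ (r = (p.length : Int) ∨ (0 ≤ r ∧ PySem.List.pyGet? p r ≠ some c)) := by
    have := hQr
    simp only [hQdef, Bool.not_eq_true', decide_eq_false_iff_not] at this
    exact this
  rw [not_or] at hQr'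
  obtain ⟨hrne, hB⟩ := hQr'
  have hrget : 0 ≤ r → PySem.List.pyGet? p r = some c := fun h' => by
    by_contra hne
    exact hB ⟨h', hne⟩
  have hrm : r < (p.length : Int) := by omega
  have hrc : r = -1 ∨ (0 ≤ r ∧ p.getD r.toNat ' ' = c) := by
    rcases lt_or_ge r 0 with h' | h'
    · left; omega
    · right
      refine ⟨h', ?_⟩
      have hg := hrget h'
      rw [pyGet?_getD' p r h' (by omega)] at hg
      exact Option.some_injective _ hg
  have hmax' : ∀ j', Suf p v j' → (j' = -1 ∨ (0 ≤ j' ∧ p.getD j'.toNat ' ' = c)) →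
      j' < (p.length : Int) → j' ≤ r := by
    intro j' hSj' hcl hlt
    apply hmax j' hSj' (by rw [h2]; exact suf_le_best p v j' hSj')
    have hno : ¬ (j' = (p.length : Int) ∨ (0 ≤ j' ∧ PySem.List.pyGet? p j' ≠ some c)) := by
      rintro (h' | ⟨h0', hne⟩)
      · omega
      · rcases hcl with rfl | ⟨_, hgd⟩
        · omega
        · exact hne (by rw [pyGet?_getD' p j' h0' hlt, hgd])
    simp only [hQdef]
    rw [decide_eq_false hno, Bool.not_false]
  have hbest : (best p (v ++ [c]) : Int) = r + 1 := best_snoc_eq p v c r hS hrc hrm hmax'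
  simp only [searchStep]
  rw [hW]
  refine ⟨?_, ?_, ?_⟩
  · show st.1 + st.2.1 - r = ((v ++ [c]).length : Int) - (r + 1)
    simp only [List.length_append, List.length_singleton]
    push_cast
    omega
  · show r + 1 = ((best p (v ++ [c]) : Nat) : Int)
    omega
  · show (if r + 1 = (p.length : Int) then st.2.2 ++ [st.1 + st.2.1 - r] else st.2.2)
      = occ p (v ++ [c])
    rw [occ_snoc p v c hp]
    by_cases hif : r + 1 = (p.length : Int)
    · rw [if_pos hif]
      have hsuff : p <:+ (v ++ [c]) := by
        rw [← best_eq_len_iff p (v ++ [c])]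
        omega
      rw [if_pos hsuff]
      have hmn : p.length ≤ v.length + 1 := by
        have := hsuff.length_le
        simpa using this
      rw [h3]
      congr 1
      simp only [List.cons.injEq, and_true]
      omega
    · rw [if_neg hif]
      have hnsuff : ¬ (p <:+ (v ++ [c])) := by
        rw [← best_eq_len_iff p (v ++ [c])]
        omega
      rw [if_neg hnsuff]
      exact h3

lemma search_inv (p : List Char) (hp : 1 ≤ p.length) (L : List Nat)
    (hL : ∀ j : Nat, j ≤ p.length → ((L.getD j 0 : Int) = (j : Int) - betaI p (j : Int))) :
    ∀ (u v : List Char) (st : Int × Int × List Int), goodSearch p v st →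
      goodSearch p (v ++ u) (u.foldl (searchStep p L) st) := by
  intro u
  induction u with
  | nil =>
    intro v st h
    simpa using h
  | cons c u ih =>
    intro v st h
    rw [show v ++ c :: u = (v ++ [c]) ++ u from by simp, List.foldl_cons]
    exact ih (v ++ [c]) _ (searchStep_good p hp L hL v c st h)

-- ---- tying it together ----

lemma window_iff (p t : List Char) (sN : Nat) (h : sN + p.length ≤ t.length) :
    ((t.drop sN).take p.length = p) ↔ p <:+ t.take (sN + p.length) := by
  constructor
  · intro he
    rw [List.take_add, he]
    exact List.suffix_append _ _
  · intro hs
    rw [List.suffix_iff_eq_drop] at hs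
    rw [show (t.take (sN + p.length)).length = sN + p.length from by simp; omega] at hs
    rw [show sN + p.length - p.length = sN from by omega] at hs
    rw [List.drop_take, show sN + p.length - sN = p.length from by omega] at hs
    exact hs.symm

lemma occ_eq_alt (p t : List Char) (hp : 1 ≤ p.length) :
    occ p t = (PySem.List.pyRange 0 ((t.length : Int) - (p.length : Int) + 1) 1).filter
      (fun i => PySem.List.slice t (some i) (some (i + (p.length : Int))) = p) := by
  unfold occ
  rw [PySem.List.pyRange_one, List.filter_map]
  rw [show (((t.length : Int) - (p.length : Int) + 1) - 0).toNat = t.length + 1 - p.length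
    from by omega]
  rw [show (fun k : Nat => (0 : Int) + (k : Int)) = Int.ofNat from by funext k; simp]
  congr 1
  apply List.filter_congr
  intro sN hsN
  rw [List.mem_range] at hsN
  have hle : sN + p.length ≤ t.length := by omega
  simp only [Function.comp_apply]
  rw [show (Int.ofNat sN + (p.length : Int)) = ((sN : Nat) : Int) + ((p.length : Nat) : Int)
    from by simp]
  rw [show (Int.ofNat sN : Int) = ((sN : Nat) : Int) from by simp]
  rw [PySem.List.slice_natCast_add]
  exact decide_eq_decide.mpr (window_iff p t sN hle).symm

-- empty-pattern behaviour of A, for exactness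
lemma knp_empty_len (t : List Char) :
    ∀ (s : Int) (out : List Int),
      ((t.foldl (searchStep [] [1]) (s, 0, out)).2.2).length = out.length + t.length := by
  induction t with
  | nil =>
    intro s out
    simp
  | cons c t ih =>
    intro s out
    rw [List.foldl_cons]
    rw [show searchStep [] [1] (s, 0, out) c = (s + 1, 0, out ++ [s + 1]) from rfl]
    rw [ih]
    simp
    omega

-- ===== VERDICT (by name: the statement is the Claim_ definition above) =====
theorem knp_iterator_spec : Claim_unchanged_knp_iterator := by
  intro text pattern _ hD
  have hpne : pattern.toList ≠ [] := fun h => hD (String.toList_eq_nil_iff.mp h)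
  have hp : 1 ≤ pattern.toList.length := by
    cases h : pattern.toList with
    | nil => exact absurd h hpne
    | cons a l => simp [h]
  obtain ⟨hlen, hget, _⟩ := tbl_inv pattern.toList pattern.toList.length (le_refl _)
  have hbest0 : best pattern.toList [] = 0 := by
    unfold best
    rw [Nat.findGreatest_eq_zero_iff]
    intro n hn hnm
    rintro ⟨_, hsuf⟩
    have h0 : pattern.toList.take n = [] := List.suffix_nil.mp hsuf
    have hlen2 := congrArg List.length h0
    rw [List.length_take] at hlen2
    simp only [List.length_nil] at hlen2
    omega
  have hinit : goodSearch pattern.toList [] ((0 : Int), (0 : Int), ([] : List Int)) := by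
    refine ⟨by simp, by rw [hbest0]; simp, ?_⟩
    show ([] : List Int) = occ pattern.toList []
    unfold occ
    rw [show ([] : List Char).length + 1 - pattern.toList.length = 0 from by
      simp only [List.length_nil]; omega]
    simp
  have hinv := search_inv pattern.toList hp (pvBuildShifts pattern.toList).1 hget
    text.toList [] ((0 : Int), (0 : Int), ([] : List Int)) hinit
  rw [List.nil_append] at hinv
  obtain ⟨_, _, hout⟩ := hinv
  show (text.toList.foldl (searchStep pattern.toList (pvBuildShifts pattern.toList).1)
      ((0 : Int), (0 : Int), ([] : List Int))).2.2 = knp_iterator_alt text pattern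
  rw [hout, occ_eq_alt pattern.toList text.toList hp]
  show _ = knp_iterator_alt text pattern
  unfold knp_iterator_alt
  rw [if_neg (by omega)]

theorem knp_iterator_changed : Claim_changed_knp_iterator := by
  unfold Claim_changed_knp_iterator; decide

theorem knp_iterator_tight : Claim_exact_knp_iterator := by
  intro text pattern _ hD heq
  have hD' : pattern = "" := hD
  subst hD'
  have hA : knp_iterator text ""
      = (text.toList.foldl (searchStep [] [1]) ((0 : Int), (0 : Int), ([] : List Int))).2.2 :=
    rfl
  have hB : knp_iterator_alt text ""
      = PySem.List.pyRange 0 ((text.toList.length : Int) + 1) 1 := rfl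
  have hlb := congrArg List.length heq
  rw [hA, hB, knp_empty_len text.toList 0 [], PySem.List.length_pyRange_one] at hlb
  simp only [List.length_nil] at hlb
  omega
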